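-- pv_equiv track=rewrite | github.com/daniel-reich/ubiquitous-fiesta | tK44PSWFuFzthwNJj_6.py | club_entry
-- ===== SOURCE A (Python) =====
-- def club_entry(word):
--   alphabet=['a',  'b',  'c',  'd',  'e',  'f',  'g',  'h',  'i',  'j',  'k',  'l',  'm',  'n',  'o',  'p',  'q',  'r',  's',  't',  'u',  'v',  'w',  'x',  'y',  'z']
--   repalpha=''
--   temp=''
--   for a in word:
--     if temp == a:
--       repalpha=a
--     temp = a
--   varint = (alphabet.index(repalpha)+1)*4
--   return varint
-- ===== SOURCE B (Python) =====
-- def club_entry(word):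
--     alphabet = ['a', 'b', 'c', 'd', 'e', 'f', 'g', 'h', 'i', 'j', 'k', 'l', 'm',
--                 'n', 'o', 'p', 'q', 'r', 's', 't', 'u', 'v', 'w', 'x', 'y', 'z']
--     repalpha = ''
--     rev = word[::-1]
--     for x, y in zip(rev, rev[1:]):
--         if x == y:
--             repalpha = x
--             break
--     return (alphabet.index(repalpha) + 1) * 4
-- ===== Notes on version B (the rewrite author's own statement) =====
-- stated objective: alternative
-- what changed: Replaces A's full forward pass that tracks the previous character and overwrites an accumulator with an early-exiting scan of the reversed string for its first adjacent equal pair.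
import Mathlib
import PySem

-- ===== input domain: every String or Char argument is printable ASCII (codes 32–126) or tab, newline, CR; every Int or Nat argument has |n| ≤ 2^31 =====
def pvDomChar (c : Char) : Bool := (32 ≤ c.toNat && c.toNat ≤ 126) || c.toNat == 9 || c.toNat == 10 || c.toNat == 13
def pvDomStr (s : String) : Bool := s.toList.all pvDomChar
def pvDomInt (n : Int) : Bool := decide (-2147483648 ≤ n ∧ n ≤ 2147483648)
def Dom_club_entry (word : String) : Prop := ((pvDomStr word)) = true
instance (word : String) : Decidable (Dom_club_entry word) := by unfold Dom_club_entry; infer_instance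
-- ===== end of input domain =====

-- B replaces A's forward overwrite-the-accumulator pass by an early-exiting scan of the
-- reversed string for its first adjacent equal pair (same result, different decomposition).

-- ===== PORT A =====
def pvAlphabet : List Char :=
  ['a','b','c','d','e','f','g','h','i','j','k','l','m',
   'n','o','p','q','r','s','t','u','v','w','x','y','z']

-- Python's repalpha/temp are '' or a one-character string; modelled as Option Char
-- (none = ''), exact because '' never equals a one-character string.
def pvStepA (st : Option Char × Option Char) (a : Char) : Option Char × Option Char :=
  (if st.2 = some a then some a else st.1, some a)

def club_entry (word : String) : Int :=
  match (word.toList.foldl pvStepA (none, none)).1 with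
  | some c =>
    match PySem.List.index? pvAlphabet c with
    | some i => ((i : Int) + 1) * 4
    | none => 0      -- alphabet.index raises ValueError here; excluded by Pre_
  | none => 0        -- alphabet.index('') raises ValueError; excluded by Pre_

-- ===== PORT B =====
-- first adjacent equal pair of the (reversed) character list
def pvFindRev : List Char → Option Char
  | x :: y :: rest => if x = y then some x else pvFindRev (y :: rest)
  | _ => none

def club_entry_alt (word : String) : Int :=
  match pvFindRev word.toList.reverse with
  | some c =>
    match PySem.List.index? pvAlphabet c with
    | some i => ((i : Int) + 1) * 4
    | none => 0      -- ValueError; excluded by Pre_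
  | none => 0        -- ValueError; excluded by Pre_

-- ===== PRECONDITION & SPEC =====
-- Pre_: the word has some adjacent doubled character and the last such doubled character is
-- a lowercase letter a–z; otherwise Python's alphabet.index raises ValueError.
def Pre_club_entry (word : String) : Prop :=
  (((word.toList.zip word.toList.tail).filterMap
      (fun p => if p.1 = p.2 then some p.1 else none)).getLast?.any
    (fun c => 'a' ≤ c && c ≤ 'z')) = true
instance (word : String) : Decidable (Pre_club_entry word) := by
  unfold Pre_club_entry; infer_instance
def pvWitness_club_entry : String := "ball"

def Spec_club_entry (word : String) (out : Int) : Prop := out = club_entry_alt word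
instance (word : String) (out : Int) : Decidable (Spec_club_entry word out) := by unfold Spec_club_entry; infer_instance

-- ===== CLAIM (what is proved, stated in full; the proofs are below) =====
def Claim_equal_club_entry : Prop := ∀ (word : String), Dom_club_entry word → Pre_club_entry word → Spec_club_entry word (club_entry word)

-- ===== LEMMAS AND PROOFS =====

-- the last doubled character of a list, recursively
def lastD : List Char → Option Char
  | a :: b :: t =>
    match lastD (b :: t) with
    | some c => some c
    | none => if a = b then some a else none
  | _ => none

theorem foldA (m : List Char) (r : Option Char) (a : Char) :
    (m.foldl pvStepA (r, some a)).1 =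
      match lastD (a :: m) with | some c => some c | none => r := by
  induction m generalizing r a with
  | nil => simp [lastD]
  | cons b t ih =>
    simp only [List.foldl_cons, pvStepA]
    rw [ih]
    by_cases h : a = b
    · subst h
      cases hl : lastD (a :: t) <;> simp [lastD, hl]
    · cases hl : lastD (b :: t) <;> simp [lastD, hl, h]

theorem foldA_main (l : List Char) :
    (l.foldl pvStepA ((none : Option Char), (none : Option Char))).1 = lastD l := by
  cases l with
  | nil => simp [lastD]
  | cons a m =>
    simp only [List.foldl_cons, pvStepA]
    rw [foldA]
    cases hl : lastD (a :: m) <;> simp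

theorem findRev_append (m : List Char) (x : Char) :
    pvFindRev (m ++ [x]) =
      match pvFindRev m with
      | some c => some c
      | none =>
        match m.getLast? with
        | some y => if y = x then some y else none
        | none => none := by
  induction m with
  | nil => simp [pvFindRev]
  | cons y rest ih =>
    cases rest with
    | nil => simp [pvFindRev]
    | cons z t =>
      rw [List.cons_append, List.cons_append,
        show pvFindRev (y :: z :: (t ++ [x])) =
          (if y = z then some y else pvFindRev (z :: (t ++ [x]))) from rfl]
      by_cases h : y = z
      · simp [h, pvFindRev]
      · rw [if_neg h, ← List.cons_append, ih]
        simp [pvFindRev, h, List.getLast?_cons_cons]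

theorem findRev_rev (l : List Char) : pvFindRev l.reverse = lastD l := by
  induction l with
  | nil => rfl
  | cons a m ih =>
    cases m with
    | nil => rfl
    | cons b t =>
      rw [show (a :: b :: t).reverse = (b :: t).reverse ++ [a] by simp]
      rw [findRev_append, ih]
      have hlast : (b :: t).reverse.getLast? = some b := by
        simp [List.getLast?_reverse]
      rw [hlast]
      by_cases h : a = b
      · subst h
        cases hl : lastD (a :: t) <;> simp [lastD, hl]
      · have h' : ¬ b = a := fun hh => h hh.symm
        cases hl : lastD (b :: t) <;> simp [lastD, hl, h, h']

-- ===== VERDICT (by name: the statement is the Claim_ definition above) =====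
theorem club_entry_spec : Claim_equal_club_entry := by
  intro word _ _
  unfold Spec_club_entry club_entry club_entry_alt
  rw [foldA_main, findRev_rev]
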